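-- pv_equiv track=rewrite | github.com/chaizup/chaizup_toc | chaizup_toc/api/pipeline_api.py | _detect_stuck_stage
-- ===== SOURCE A (Python) =====
-- def _detect_stuck_stage(docs):
--     """Return the stage name where the most documents are sitting without progress."""
--     if not docs:
--         return None
--     open_docs = [d for d in docs if not d.get("is_closed")]
--     if not open_docs:
--         return None
--     # Earliest open stage = stuck stage
--     stage_order = ["material_request", "rfq_pp", "sq_wo", "po_jc", "receipt_qc", "output"]
--     for stage in stage_order:
--         if any(d["stage"] == stage for d in open_docs):
--             return stage
--     return open_docs[0]["stage"]
-- ===== SOURCE B (Python) =====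
-- def _detect_stuck_stage(docs):
--     """Return the stage name where the most documents are sitting without progress."""
--     stage_order = ["material_request", "rfq_pp", "sq_wo", "po_jc", "receipt_qc", "output"]
--     idx = {s: i for i, s in enumerate(stage_order)}
--     first_open = None
--     best = None
--     for d in docs:
--         if d.get("is_closed"):
--             continue
--         if first_open is None:
--             first_open = d
--         i = idx.get(d["stage"])
--         if i is not None and (best is None or i < best):
--             best = i
--             if i == 0:
--                 break
--     if first_open is None:
--         return None
--     return stage_order[best] if best is not None else first_open["stage"]
-- ===== Notes on version B (the rewrite author's own statement) =====
-- stated objective: faster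
-- what changed: Replaces A's up-to-six repeated any-scans of open_docs (one per stage name) by a single pass over open_docs that tracks the minimal stage index via a precomputed name-to-index dict, breaking early when index 0 is seen.
import Mathlib
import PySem

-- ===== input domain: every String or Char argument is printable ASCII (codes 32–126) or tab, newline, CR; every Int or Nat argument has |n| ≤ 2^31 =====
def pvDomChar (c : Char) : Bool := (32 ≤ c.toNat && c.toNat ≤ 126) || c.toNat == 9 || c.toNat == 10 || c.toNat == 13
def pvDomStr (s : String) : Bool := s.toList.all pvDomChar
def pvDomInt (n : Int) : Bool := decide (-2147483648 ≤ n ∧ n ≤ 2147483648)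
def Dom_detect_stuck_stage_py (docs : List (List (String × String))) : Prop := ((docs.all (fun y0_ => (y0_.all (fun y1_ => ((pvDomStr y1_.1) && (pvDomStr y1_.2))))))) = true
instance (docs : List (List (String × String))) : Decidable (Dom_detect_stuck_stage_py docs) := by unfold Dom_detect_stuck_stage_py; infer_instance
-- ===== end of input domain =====

-- B replaces A's six repeated scans of open_docs (one per stage) by a single pass that
-- tracks the smallest stage index via a precomputed name→index dict (objective: faster,
-- constant-factor: one pass instead of up to six).


-- ===== PORT A =====
-- shared helpers: a doc is a dict[str,str] as an association list; lookup = first match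
def pvLookup (d : List (String × String)) (k : String) : Option String :=
  (d.find? (fun p => p.1 == k)).map (·.2)

-- 'not d.get("is_closed")': absent or empty string is falsy
def pvOpen (d : List (String × String)) : Bool :=
  match pvLookup d "is_closed" with
  | none => true
  | some s => s == ""

def pvStageOrder : List String :=
  ["material_request", "rfq_pp", "sq_wo", "po_jc", "receipt_qc", "output"]

-- d["stage"] raises KeyError when absent (excluded by Pre_); the port reads the lookup
-- as an Option and a missing key simply never equals a stage name
def detect_stuck_stage_py (docs : List (List (String × String))) : Option String :=
  if docs.isEmpty then none
  else
    match docs.filter pvOpen with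
    | [] => none
    | d0 :: rest =>
      match pvStageOrder.find?
          (fun stage => (d0 :: rest).any (fun d => pvLookup d "stage" == some stage)) with
      | some stage => some stage
      | none => pvLookup d0 "stage"

-- ===== PORT B =====
-- idx = {s: i for i, s in enumerate(stage_order)}
def pvIdx : PySem.Dict String Int :=
  PySem.Dict.ofList ((PySem.List.enumerate pvStageOrder 0).map (fun p => (p.2, p.1)))

-- i = idx.get(d["stage"]); a missing "stage" key raises in Python (excluded by Pre_),
-- here it reads as none and is skipped like an unknown stage
def pvKey (d : List (String × String)) : Option Int :=
  (pvLookup d "stage").bind (fun s => PySem.Dict.get? pvIdx s)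

-- the single pass: skip closed docs, remember the first open one, keep the running
-- minimum of the known stage indices, break early on index 0
def pvScan (fo : Option (List (String × String))) (best : Option Int) :
    List (List (String × String)) → Option (List (String × String)) × Option Int
  | [] => (fo, best)
  | d :: ds =>
    if pvOpen d then
      let fo' := match fo with | none => some d | some x => some x
      match pvKey d with
      | none => pvScan fo' best ds
      | some i =>
        if (match best with | none => true | some b => i < b) then
          if i = 0 then (fo', some 0) else pvScan fo' (some i) ds
        else pvScan fo' best ds
    else pvScan fo best ds

def detect_stuck_stage_py_alt (docs : List (List (String × String))) : Option String :=
  match pvScan none none docs with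
  | (none, _) => none
  | (some _, some b) => PySem.List.pyGet? pvStageOrder b
  | (some d0, none) => pvLookup d0 "stage"

-- ===== PRECONDITION & SPEC =====
-- Pre_ excludes exactly the inputs on which the Python A raises KeyError: an open doc
-- without a "stage" key that A's scan actually reads (i.e. one occurring before the
-- first open doc whose stage is "material_request", or anywhere when there is none).
def Pre_detect_stuck_stage_py (docs : List (List (String × String))) : Prop :=
  ∀ d ∈ (docs.filter pvOpen).takeWhile
      (fun d => !(pvLookup d "stage" == some "material_request")),
    (pvLookup d "stage").isSome
instance (docs : List (List (String × String))) : Decidable (Pre_detect_stuck_stage_py docs) := by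
  unfold Pre_detect_stuck_stage_py; infer_instance

def pvWitness_detect_stuck_stage_py : (List (List (String × String))) :=
  [[("stage", "rfq_pp")], [("stage", "sq_wo"), ("is_closed", "1")]]

def Spec_detect_stuck_stage_py (docs : List (List (String × String))) (out : Option String) : Prop := out = detect_stuck_stage_py_alt docs
instance (docs : List (List (String × String))) (out : Option String) : Decidable (Spec_detect_stuck_stage_py docs out) := by unfold Spec_detect_stuck_stage_py; infer_instance

-- ===== CLAIM (what is proved, stated in full; the proofs are below) =====
def Claim_equal_detect_stuck_stage_py : Prop := ∀ (docs : List (List (String × String))), Dom_detect_stuck_stage_py docs → Pre_detect_stuck_stage_py docs → Spec_detect_stuck_stage_py docs (detect_stuck_stage_py docs)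

-- ===== LEMMAS AND PROOFS =====

-- the literal contents of the index dict
theorem pvIdx_eq : pvIdx = PySem.Dict.mk
    [("material_request", 0), ("rfq_pp", 1), ("sq_wo", 2), ("po_jc", 3),
     ("receipt_qc", 4), ("output", 5)] := by decide

-- full characterisation of a lookup in pvIdx
theorem idx_get_iff (s : String) (j : Int) :
    PySem.Dict.get? pvIdx s = some j ↔
      (s = "material_request" ∧ j = 0) ∨ (s = "rfq_pp" ∧ j = 1) ∨ (s = "sq_wo" ∧ j = 2) ∨
      (s = "po_jc" ∧ j = 3) ∨ (s = "receipt_qc" ∧ j = 4) ∨ (s = "output" ∧ j = 5) := by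
  rw [pvIdx_eq]
  simp only [PySem.Dict.get?_mk_cons]
  split_ifs with a1 a2 a3 a4 a5 a6
  · rw [beq_iff_eq] at a1; subst a1; simp [eq_comm]
  · rw [beq_iff_eq] at a2; subst a2; simp [eq_comm]
  · rw [beq_iff_eq] at a3; subst a3; simp [eq_comm]
  · rw [beq_iff_eq] at a4; subst a4; simp [eq_comm]
  · rw [beq_iff_eq] at a5; subst a5; simp [eq_comm]
  · rw [beq_iff_eq] at a6; subst a6; simp [eq_comm]
  · constructor
    · intro h; simp [PySem.Dict.get?] at h
    · rintro (⟨h, _⟩ | ⟨h, _⟩ | ⟨h, _⟩ | ⟨h, _⟩ | ⟨h, _⟩ | ⟨h, _⟩) <;> subst h <;> simp_all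

theorem key_range (d : List (String × String)) (i : Int) (h : pvKey d = some i) :
    0 ≤ i ∧ i < 6 := by
  unfold pvKey at h
  cases hs : pvLookup d "stage" with
  | none => simp [hs] at h
  | some s =>
    simp [hs] at h
    rcases (idx_get_iff s i).mp h with ⟨_, h⟩ | ⟨_, h⟩ | ⟨_, h⟩ | ⟨_, h⟩ | ⟨_, h⟩ | ⟨_, h⟩ <;>
      omega

-- omin = the loop body's 'best' update
def omin (b : Option Int) (i : Int) : Option Int :=
  match b with
  | none => some i
  | some x => if i < x then some i else some x

theorem foldl_omin_zero (t : List Int) (h : ∀ i ∈ t, 0 ≤ i) :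
    t.foldl omin (some 0) = some 0 := by
  induction t with
  | nil => rfl
  | cons a t ih =>
    have ha : 0 ≤ a := h a (by simp)
    have h0 : omin (some 0) a = some 0 := by
      simp only [omin]; rw [if_neg (by omega)]
    simp only [List.foldl_cons, h0]
    exact ih (fun i hi => h i (by simp [hi]))

theorem range_filterMap (ds : List (List (String × String))) :
    ∀ i ∈ ds.filterMap pvKey, 0 ≤ i := by
  intro j hj
  rcases List.mem_filterMap.mp hj with ⟨d', _, hd'⟩
  exact (key_range d' j hd').1

theorem or_some_or (fo : Option (List (String × String))) (d : List (String × String))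
    (y : Option (List (String × String))) : (fo.or (some d)).or y = fo.or (some d) := by
  cases fo <;> rfl

theorem scan_eq (docs : List (List (String × String)))
    (fo : Option (List (String × String))) (b : Option Int)
    (hb : ∀ x, b = some x → 0 ≤ x) :
    pvScan fo b docs = (fo.or ((docs.filter pvOpen).head?),
      ((docs.filter pvOpen).filterMap pvKey).foldl omin b) := by
  induction docs generalizing fo b with
  | nil => cases fo <;> rfl
  | cons d ds ih =>
    by_cases hod : pvOpen d
    · have hfo : (match fo with
          | none => some d
          | some x => some x) = fo.or (some d) := by cases fo <;> rfl
      simp only [pvScan, if_pos hod, List.filter_cons_of_pos hod, List.head?_cons, hfo]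
      cases hk : pvKey d with
      | none =>
        simp only [List.filterMap_cons, hk]
        rw [ih (fo.or (some d)) b hb, or_some_or]
      | some i =>
        have hi := key_range d i hk
        simp only [List.filterMap_cons, hk, List.foldl_cons]
        cases b with
        | none =>
          rw [if_pos (by simp)]
          by_cases hz : i = 0
          · subst hz
            rw [if_pos rfl]
            refine Prod.ext rfl ?_
            exact (foldl_omin_zero _ (range_filterMap _)).symm
          · rw [if_neg hz, ih (fo.or (some d)) (some i)
              (by intro x hx; injection hx with hx; omega), or_some_or]
            rfl
        | some x =>
          by_cases hlt : i < x
          · rw [if_pos (by simp [hlt])]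
            have ho : omin (some x) i = some i := by simp [omin, hlt]
            rw [ho]
            by_cases hz : i = 0
            · subst hz
              rw [if_pos rfl]
              refine Prod.ext rfl ?_
              exact (foldl_omin_zero _ (range_filterMap _)).symm
            · rw [if_neg hz, ih (fo.or (some d)) (some i)
                (by intro y hy; injection hy with hy; omega), or_some_or]
          · rw [if_neg (by simp [hlt])]
            have ho : omin (some x) i = some x := by simp [omin, hlt]
            rw [ho, ih (fo.or (some d)) (some x) hb, or_some_or]
    · simp only [pvScan, if_neg hod, List.filter_cons_of_neg hod]
      exact ih fo b hb

theorem foldl_omin_some (l : List Int) (a : Int) :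
    l.foldl omin (some a) = some (l.foldl min a) := by
  induction l generalizing a with
  | nil => rfl
  | cons x t ih =>
    have h : omin (some a) x = some (min a x) := by
      simp only [omin]
      rcases lt_or_ge x a with h | h
      · rw [if_pos h, min_eq_right (le_of_lt h)]
      · rw [if_neg (not_lt.mpr h), min_eq_left h]
    simp only [List.foldl_cons, h, ih]

theorem foldl_omin_none (l : List Int) : l.foldl omin none = l.min? := by
  cases l with
  | nil => rfl
  | cons a t =>
    rw [show List.foldl omin none (a :: t) = List.foldl omin (some a) t from rfl,
      foldl_omin_some]
    rfl

theorem scan_none_none (docs : List (List (String × String))) :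
    pvScan none none docs = ((docs.filter pvOpen).head?,
      ((docs.filter pvOpen).filterMap pvKey).min?) := by
  rw [scan_eq docs none none (by intro x hx; cases hx), foldl_omin_none]
  rfl

-- membership in the key-index list matches A's per-stage any-scan
theorem any_eq_mem (od : List (List (String × String))) (j : Int) (s : String)
    (hj : PySem.Dict.get? pvIdx s = some j)
    (hinj : ∀ s', PySem.Dict.get? pvIdx s' = some j → s' = s) :
    (od.any (fun d => pvLookup d "stage" == some s) = true) ↔ j ∈ od.filterMap pvKey := by
  rw [List.any_eq_true, List.mem_filterMap]
  constructor
  · rintro ⟨d, hd, hds⟩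
    refine ⟨d, hd, ?_⟩
    simp at hds
    simp [pvKey, hds, hj]
  · rintro ⟨d, hd, hds⟩
    refine ⟨d, hd, ?_⟩
    unfold pvKey at hds
    cases hls : pvLookup d "stage" with
    | none => simp [hls] at hds
    | some s' =>
      simp [hls] at hds ⊢
      exact hinj s' hds

-- the core correspondence: first stage (in order) present in od  =  min key index
theorem core (od : List (List (String × String))) (fb : Option String) :
    (match pvStageOrder.find?
        (fun stage => od.any (fun d => pvLookup d "stage" == some stage)) with
      | some stage => some stage
      | none => fb)
    = (match (od.filterMap pvKey).min? with
      | some b => PySem.List.pyGet? pvStageOrder b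
      | none => fb) := by
  set M := od.filterMap pvKey with hM
  have hrange : ∀ i ∈ M, 0 ≤ i ∧ i < 6 := by
    intro i hi
    rcases List.mem_filterMap.mp hi with ⟨d, _, hd⟩
    exact key_range d i hd
  have hmem : ∀ (j : Int) (s : String),
      PySem.Dict.get? pvIdx s = some j →
      (∀ s', PySem.Dict.get? pvIdx s' = some j → s' = s) →
      ((od.any (fun d => pvLookup d "stage" == some s) = true) ↔ j ∈ M) := by
    intro j s hgs hinj
    rw [hM]
    exact any_eq_mem od j s hgs hinj
  have h0 := hmem 0 "material_request" (by decide)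
    (by intro s' h; rcases (idx_get_iff s' 0).mp h with ⟨h,_⟩|⟨_,h⟩|⟨_,h⟩|⟨_,h⟩|⟨_,h⟩|⟨_,h⟩ <;> first | exact h | omega)
  have h1 := hmem 1 "rfq_pp" (by decide)
    (by intro s' h; rcases (idx_get_iff s' 1).mp h with ⟨_,h⟩|⟨h,_⟩|⟨_,h⟩|⟨_,h⟩|⟨_,h⟩|⟨_,h⟩ <;> first | exact h | omega)
  have h2 := hmem 2 "sq_wo" (by decide)
    (by intro s' h; rcases (idx_get_iff s' 2).mp h with ⟨_,h⟩|⟨_,h⟩|⟨h,_⟩|⟨_,h⟩|⟨_,h⟩|⟨_,h⟩ <;> first | exact h | omega)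
  have h3 := hmem 3 "po_jc" (by decide)
    (by intro s' h; rcases (idx_get_iff s' 3).mp h with ⟨_,h⟩|⟨_,h⟩|⟨_,h⟩|⟨h,_⟩|⟨_,h⟩|⟨_,h⟩ <;> first | exact h | omega)
  have h4 := hmem 4 "receipt_qc" (by decide)
    (by intro s' h; rcases (idx_get_iff s' 4).mp h with ⟨_,h⟩|⟨_,h⟩|⟨_,h⟩|⟨_,h⟩|⟨h,_⟩|⟨_,h⟩ <;> first | exact h | omega)
  have h5 := hmem 5 "output" (by decide)
    (by intro s' h; rcases (idx_get_iff s' 5).mp h with ⟨_,h⟩|⟨_,h⟩|⟨_,h⟩|⟨_,h⟩|⟨_,h⟩|⟨h,_⟩ <;> first | exact h | omega)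
  clear hmem
  unfold pvStageOrder
  by_cases m0 : (0 : Int) ∈ M
  · rw [List.find?_cons_of_pos (p := fun stage => od.any fun d => pvLookup d "stage" == some stage) (h0.mpr m0)]
    rw [List.min?_eq_some_iff.mpr ⟨m0, fun b hb => (hrange b hb).1⟩]
    rfl
  · rw [List.find?_cons_of_neg (p := fun stage => od.any fun d => pvLookup d "stage" == some stage) (by simpa using fun h => m0 (h0.mp h))]
    by_cases m1 : (1 : Int) ∈ M
    · rw [List.find?_cons_of_pos (p := fun stage => od.any fun d => pvLookup d "stage" == some stage) (h1.mpr m1)]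
      rw [List.min?_eq_some_iff.mpr ⟨m1, fun b hb => by
        have := hrange b hb
        by_cases hb0 : b = 0
        · exact absurd (hb0 ▸ hb) m0
        · omega⟩]
      rfl
    · rw [List.find?_cons_of_neg (p := fun stage => od.any fun d => pvLookup d "stage" == some stage) (by simpa using fun h => m1 (h1.mp h))]
      by_cases m2 : (2 : Int) ∈ M
      · rw [List.find?_cons_of_pos (p := fun stage => od.any fun d => pvLookup d "stage" == some stage) (h2.mpr m2)]
        rw [List.min?_eq_some_iff.mpr ⟨m2, fun b hb => by
          have := hrange b hb
          by_cases hb0 : b = 0; · exact absurd (hb0 ▸ hb) m0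
          by_cases hb1 : b = 1; · exact absurd (hb1 ▸ hb) m1
          omega⟩]
        rfl
      · rw [List.find?_cons_of_neg (p := fun stage => od.any fun d => pvLookup d "stage" == some stage) (by simpa using fun h => m2 (h2.mp h))]
        by_cases m3 : (3 : Int) ∈ M
        · rw [List.find?_cons_of_pos (p := fun stage => od.any fun d => pvLookup d "stage" == some stage) (h3.mpr m3)]
          rw [List.min?_eq_some_iff.mpr ⟨m3, fun b hb => by
            have := hrange b hb
            by_cases hb0 : b = 0; · exact absurd (hb0 ▸ hb) m0
            by_cases hb1 : b = 1; · exact absurd (hb1 ▸ hb) m1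
            by_cases hb2 : b = 2; · exact absurd (hb2 ▸ hb) m2
            omega⟩]
          rfl
        · rw [List.find?_cons_of_neg (p := fun stage => od.any fun d => pvLookup d "stage" == some stage) (by simpa using fun h => m3 (h3.mp h))]
          by_cases m4 : (4 : Int) ∈ M
          · rw [List.find?_cons_of_pos (p := fun stage => od.any fun d => pvLookup d "stage" == some stage) (h4.mpr m4)]
            rw [List.min?_eq_some_iff.mpr ⟨m4, fun b hb => by
              have := hrange b hb
              by_cases hb0 : b = 0; · exact absurd (hb0 ▸ hb) m0
              by_cases hb1 : b = 1; · exact absurd (hb1 ▸ hb) m1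
              by_cases hb2 : b = 2; · exact absurd (hb2 ▸ hb) m2
              by_cases hb3 : b = 3; · exact absurd (hb3 ▸ hb) m3
              omega⟩]
            rfl
          · rw [List.find?_cons_of_neg (p := fun stage => od.any fun d => pvLookup d "stage" == some stage) (by simpa using fun h => m4 (h4.mp h))]
            by_cases m5 : (5 : Int) ∈ M
            · rw [List.find?_cons_of_pos (p := fun stage => od.any fun d => pvLookup d "stage" == some stage) (h5.mpr m5)]
              rw [List.min?_eq_some_iff.mpr ⟨m5, fun b hb => by
                have := hrange b hb
                by_cases hb0 : b = 0; · exact absurd (hb0 ▸ hb) m0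
                by_cases hb1 : b = 1; · exact absurd (hb1 ▸ hb) m1
                by_cases hb2 : b = 2; · exact absurd (hb2 ▸ hb) m2
                by_cases hb3 : b = 3; · exact absurd (hb3 ▸ hb) m3
                by_cases hb4 : b = 4; · exact absurd (hb4 ▸ hb) m4
                omega⟩]
              rfl
            · rw [List.find?_cons_of_neg (p := fun stage => od.any fun d => pvLookup d "stage" == some stage) (by simpa using fun h => m5 (h5.mp h))]
              have hMnil : M = [] := by
                rcases hMe : M with _ | ⟨a, t⟩
                · rfl
                · exfalso
                  have ha : a ∈ M := by rw [hMe]; simp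
                  obtain ⟨hla, hra⟩ := hrange a ha
                  interval_cases a
                  · exact m0 ha
                  · exact m1 ha
                  · exact m2 ha
                  · exact m3 ha
                  · exact m4 ha
                  · exact m5 ha
              rw [hMnil]
              simp

-- ===== VERDICT (by name: the statement is the Claim_ definition above) =====
theorem detect_stuck_stage_py_spec : Claim_equal_detect_stuck_stage_py := by
  intro docs _ _
  unfold Spec_detect_stuck_stage_py detect_stuck_stage_py detect_stuck_stage_py_alt
  rw [scan_none_none]
  cases hf : docs.filter pvOpen with
  | nil =>
    cases hd : docs.isEmpty <;> simp
  | cons d0 rest =>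
    have hd : docs.isEmpty = false := by
      cases docs with
      | nil => simp at hf
      | cons _ _ => rfl
    simp only [hd, Bool.false_eq_true, if_false, List.head?_cons]
    show (match List.find?
            (fun stage => (d0 :: rest).any (fun d => pvLookup d "stage" == some stage))
            pvStageOrder with
          | some stage => some stage
          | none => pvLookup d0 "stage")
        = (match ((some d0 : Option (List (String × String))),
              ((d0 :: rest).filterMap pvKey).min?) with
          | (none, _) => none
          | (some _, some b) => PySem.List.pyGet? pvStageOrder b
          | (some d0, none) => pvLookup d0 "stage")
    have hc := core (d0 :: rest) (pvLookup d0 "stage")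
    cases hm : ((d0 :: rest).filterMap pvKey).min? with
    | none => rw [hm] at hc; exact hc
    | some b => rw [hm] at hc; exact hc
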